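-- pv_equiv track=rewrite | github.com/09-03/Infa | Exam/22.py | amfibr
-- ===== SOURCE A (Python) =====
-- def amfibr(udar):
--     match = 0
--     amfibr_syllable = []
--     for i in range(1,len(udar)+1):
--         syllable = 3*i - 1
--         amfibr_syllable.append(syllable)
--     for item in udar:
--         if item in amfibr_syllable:
--             match+=1
--     return match
-- ===== SOURCE B (Python) =====
-- def amfibr(udar):
--     # O(n): an item matches iff it has the form 3*i-1 for some 1 <= i <= len(udar),
--     # i.e. 2 <= item <= 3*len(udar)-1 and item % 3 == 2.
--     n = len(udar)
--     return sum(1 for x in udar if 2 <= x <= 3 * n - 1 and x % 3 == 2)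
-- ===== Notes on version B (the rewrite author's own statement) =====
-- stated objective: faster
-- what changed: Replaces the built list of amphibrach positions and the per-item linear membership scan by a one-pass arithmetic test (2 <= x <= 3n-1 and x % 3 == 2).
import Mathlib
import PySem

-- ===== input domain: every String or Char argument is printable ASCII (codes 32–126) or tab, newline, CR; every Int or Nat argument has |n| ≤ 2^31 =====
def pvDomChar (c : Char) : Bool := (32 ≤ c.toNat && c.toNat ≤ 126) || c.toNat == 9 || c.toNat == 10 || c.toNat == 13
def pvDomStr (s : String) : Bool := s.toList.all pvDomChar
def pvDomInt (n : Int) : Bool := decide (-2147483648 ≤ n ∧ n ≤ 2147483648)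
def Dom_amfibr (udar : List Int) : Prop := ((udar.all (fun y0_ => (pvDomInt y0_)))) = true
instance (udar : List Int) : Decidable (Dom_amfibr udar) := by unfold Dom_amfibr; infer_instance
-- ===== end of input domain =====

-- B replaces A's quadratic list-membership scan by a one-pass arithmetic test (faster, asymptotic).

-- ===== PORT A =====
def amfibr (udar : List Int) : Int :=
  -- amfibr_syllable built by appending 3*i-1 for i in range(1, len(udar)+1)
  let amfibr_syllable : List Int :=
    (PySem.List.pyRange 1 ((udar.length : Int) + 1) 1).foldl
      (fun acc i => acc ++ [3 * i - 1]) []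
  -- for item in udar: if item in amfibr_syllable: match += 1
  udar.foldl (fun m item => if item ∈ amfibr_syllable then m + 1 else m) 0

-- ===== PORT B =====
def amfibr_alt (udar : List Int) : Int :=
  let n : Int := (udar.length : Int)
  udar.foldl
    (fun acc x => acc + (if 2 ≤ x ∧ x ≤ 3 * n - 1 ∧ PySem.Int.mod x 3 = 2 then (1 : Int) else 0))
    0

-- ===== PRECONDITION & SPEC =====
def Spec_amfibr (udar : List Int) (out : Int) : Prop := out = amfibr_alt udar
instance (udar : List Int) (out : Int) : Decidable (Spec_amfibr udar out) := by unfold Spec_amfibr; infer_instance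

-- ===== CLAIM (what is proved, stated in full; the proofs are below) =====
def Claim_equal_amfibr : Prop := ∀ (udar : List Int), Dom_amfibr udar → Spec_amfibr udar (amfibr udar)

-- ===== LEMMAS AND PROOFS =====

-- membership in the syllable list is the arithmetic condition
theorem mem_syllables (n : Nat) (x : Int) :
    (x ∈ (PySem.List.pyRange 1 ((n : Int) + 1) 1).map (fun i => 3 * i - 1)) ↔
      (2 ≤ x ∧ x ≤ 3 * (n : Int) - 1 ∧ PySem.Int.mod x 3 = 2) := by
  rw [List.mem_map]
  constructor
  · rintro ⟨i, hi, rfl⟩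
    rw [PySem.List.mem_pyRange_one] at hi
    rw [PySem.Int.mod_eq_emod_of_pos (by norm_num)]
    omega
  · rintro ⟨h1, h2, h3⟩
    rw [PySem.Int.mod_eq_emod_of_pos (by norm_num)] at h3
    refine ⟨(x + 1) / 3, ?_, ?_⟩
    · rw [PySem.List.mem_pyRange_one]; omega
    · omega

theorem amfibr_eq (udar : List Int) : amfibr udar = amfibr_alt udar := by
  unfold amfibr amfibr_alt
  rw [PySem.List.foldl_append_singleton_eq_map, List.nil_append]
  apply PySem.List.foldl_congr_mem
  intro acc x _
  by_cases h : x ∈ (PySem.List.pyRange 1 ((udar.length : Int) + 1) 1).map (fun i => 3 * i - 1)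
  · rw [if_pos h, if_pos ((mem_syllables udar.length x).mp h)]
  · rw [if_neg h, if_neg (fun hc => h ((mem_syllables udar.length x).mpr hc))]
    simp

-- ===== VERDICT (by name: the statement is the Claim_ definition above) =====
theorem amfibr_spec : Claim_equal_amfibr := by
  intro udar _
  unfold Spec_amfibr
  exact amfibr_eq udar
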